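-- pv_equiv track=rewrite | github.com/zhwan2845/coding-interview | coding_interview/1-7.py | rotate_matrix_180
-- ===== SOURCE A (Python) =====
-- from typing import List
--
-- def rotate_matrix_180(matrix: List[List[int]]) -> List[List[int]]:
--     n = len(matrix[0])
--     new_matrix = []
--     for i in range(n):
--         array = []
--         for j in range(n):
--             array.append(0)
--         new_matrix.append(array)
--
--     for i in range(n):
--         for j in range(n):
--             new_matrix[n - i - 1][n - j - 1] = matrix[i][j]
--     return new_matrix
-- ===== SOURCE B (Python) =====
-- from typing import List
--
-- def rotate_matrix_180(matrix: List[List[int]]) -> List[List[int]]: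
--     n = len(matrix[0])
--     flat = [matrix[i][j] for i in range(n) for j in range(n)]
--     flat.reverse()
--     return [flat[r * n:(r + 1) * n] for r in range(n)]
-- ===== Notes on version B (the rewrite author's own statement) =====
-- stated objective: simpler
-- what changed: Replaces the zero-matrix preallocation plus in-place double-indexed assignment with a flatten/reverse/reshape pipeline: the n*n block is flattened row-major, reversed once, and sliced back into n rows.
import Mathlib
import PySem

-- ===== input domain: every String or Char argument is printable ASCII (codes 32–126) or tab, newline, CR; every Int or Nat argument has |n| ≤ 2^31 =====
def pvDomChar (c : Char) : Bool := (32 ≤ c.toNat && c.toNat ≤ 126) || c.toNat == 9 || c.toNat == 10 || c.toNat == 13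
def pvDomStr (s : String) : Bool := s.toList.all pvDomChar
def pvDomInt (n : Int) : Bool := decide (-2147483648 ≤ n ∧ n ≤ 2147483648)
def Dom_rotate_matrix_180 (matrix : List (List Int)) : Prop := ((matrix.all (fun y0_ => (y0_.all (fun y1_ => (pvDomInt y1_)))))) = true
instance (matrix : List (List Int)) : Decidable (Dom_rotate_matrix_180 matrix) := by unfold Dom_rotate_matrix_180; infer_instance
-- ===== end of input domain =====

-- B replaces A's zero-matrix preallocation + in-place double-indexed assignment with a
-- flatten / reverse / reshape-by-slicing pipeline (simpler decomposition, same cost).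


-- ===== PORT A =====
-- n = len(matrix[0]); Pre_ guarantees matrix ≠ [], so headD is exact.
-- matrix[i][j] is read via getD; Pre_ keeps i, j in range, so this is exact.
-- new_matrix[n-i-1][n-j-1] = v is List.modify/List.set at a nonnegative in-range
-- index (0 ≤ i, j < n), hence exact: no negative-index wraparound can occur.
def rotate_matrix_180 (matrix : List (List Int)) : List (List Int) :=
  let n := (matrix.headD []).length
  let new_matrix := (List.range n).map (fun _ => (List.range n).map (fun _ => (0 : Int)))
  (List.range n).foldl (fun nm i =>
    (List.range n).foldl (fun nm j =>
      nm.modify (n - 1 - i) (fun row => row.set (n - 1 - j) ((matrix.getD i []).getD j 0))) nm)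
    new_matrix

-- ===== PORT B =====
-- flat = [matrix[i][j] for i in range(n) for j in range(n)]; flat.reverse();
-- return [flat[r*n:(r+1)*n] for r in range(n)]   (slices via PySem.List.slice, exact)
def rotate_matrix_180_alt (matrix : List (List Int)) : List (List Int) :=
  let n := (matrix.headD []).length
  let flat := (List.range n).flatMap (fun i =>
    (List.range n).map (fun j => (matrix.getD i []).getD j 0))
  let rev := flat.reverse
  (List.range n).map (fun (r : Nat) =>
    PySem.List.slice rev (some ((r : Int) * (n : Int))) (some (((r : Int) + 1) * (n : Int))))

-- ===== PRECONDITION & SPEC =====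
-- Pre_ excludes exactly the inputs on which Python A (and B) raises IndexError:
-- the empty matrix (matrix[0]) and matrices where some matrix[i][j] with
-- i, j < n = len(matrix[0]) does not exist (missing or short rows).
def Pre_rotate_matrix_180 (matrix : List (List Int)) : Prop :=
  matrix ≠ [] ∧ (matrix.headD []).length ≤ matrix.length ∧
    ∀ i < (matrix.headD []).length, (matrix.headD []).length ≤ (matrix.getD i []).length
instance (matrix : List (List Int)) : Decidable (Pre_rotate_matrix_180 matrix) := by
  unfold Pre_rotate_matrix_180; infer_instance
def pvWitness_rotate_matrix_180 : List (List Int) := [[1, 2], [3, 4]]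
def Spec_rotate_matrix_180 (matrix : List (List Int)) (out : List (List Int)) : Prop := out = rotate_matrix_180_alt matrix
instance (matrix : List (List Int)) (out : List (List Int)) : Decidable (Spec_rotate_matrix_180 matrix out) := by unfold Spec_rotate_matrix_180; infer_instance

-- ===== CLAIM (what is proved, stated in full; the proofs are below) =====
def Claim_equal_rotate_matrix_180 : Prop := ∀ (matrix : List (List Int)), Dom_rotate_matrix_180 matrix → Pre_rotate_matrix_180 matrix → Spec_rotate_matrix_180 matrix (rotate_matrix_180 matrix)

-- ===== LEMMAS AND PROOFS =====

-- modify at an index inside the left part of an append acts on the left part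
theorem pv_modify_append_left {α : Type} (l r : List α) (k : Nat) (f : α → α)
    (h : k < l.length) : (l ++ r).modify k f = l.modify k f ++ r := by
  induction l generalizing k with
  | nil => simp at h
  | cons x t ih =>
    cases k with
    | zero => simp [List.modify_zero_cons]
    | succ k =>
      simp only [List.cons_append, List.modify_succ_cons]
      rw [ih k (by simpa using h)]

-- modify at the position just past l replaces the appended singleton's element
theorem pv_modify_append_self {α : Type} (l : List α) (x : α) (f : α → α) :
    (l ++ [x]).modify l.length f = l ++ [f x] := by
  induction l with
  | nil => simp [List.modify_zero_cons]
  | cons y t ih => simpa [List.modify_succ_cons] using ih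

-- two modifies at the same index compose
theorem pv_modify_modify {α : Type} : ∀ (l : List α) (k : Nat) (g g' : α → α),
    (l.modify k g).modify k g' = l.modify k (fun a => g' (g a)) := by
  intro l
  induction l with
  | nil => intro k g g'; simp [List.modify_nil]
  | cons x t ih =>
    intro k g g'
    cases k with
    | zero => simp [List.modify_zero_cons]
    | succ k => simp only [List.modify_succ_cons]; rw [ih]

-- modify by the identity is the identity
theorem pv_modify_id {α : Type} : ∀ (l : List α) (k : Nat), l.modify k (fun a => a) = l := by
  intro l
  induction l with
  | nil => intro k; simp [List.modify_nil]
  | cons x t ih =>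
    intro k
    cases k with
    | zero => simp [List.modify_zero_cons]
    | succ k => simp only [List.modify_succ_cons]; rw [ih]

-- a fold of modifies at one fixed index fuses into a single modify
theorem pv_foldl_modify_fuse {α β : Type} (k : Nat) (g : β → α → α) :
    ∀ (l : List β) (nm : List α),
      l.foldl (fun nm j => nm.modify k (g j)) nm
        = nm.modify k (fun row => l.foldl (fun row j => g j row) row) := by
  intro l
  induction l with
  | nil => intro nm; simp [pv_modify_id]
  | cons j l ih =>
    intro nm
    simp only [List.foldl_cons]
    rw [ih, pv_modify_modify]

-- a fold whose steps preserve a fixed last element and an invariant P factors through it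
theorem pv_foldl_last_fixed {α β : Type}
    (f g : List α → β → List α) (x : α) (P : List α → Prop) :
    ∀ (l : List β) (t : List α), P t →
      (∀ a b, b ∈ l → P a → f (a ++ [x]) b = g a b ++ [x]) →
      (∀ a b, b ∈ l → P a → P (g a b)) →
      l.foldl f (t ++ [x]) = l.foldl g t ++ [x] := by
  intro l
  induction l with
  | nil => intro t _ _ _; simp
  | cons b l ih =>
    intro t hP H Hpres
    simp only [List.foldl_cons]
    rw [H t b (by simp) hP]
    exact ih _ (Hpres t b (by simp) hP)
      (fun a c hc hPa => H a c (by simp [hc]) hPa)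
      (fun a c hc hPa => Hpres a c (by simp [hc]) hPa)

-- Folding `modify (m-1-i) (h i)` over i = 0..m-1 on a length-m list whose
-- elements all satisfy `h i a = r i` yields the reversed list of the `r i`.
theorem pv_fill_modify {α : Type} :
    ∀ (m : Nat) (h : Nat → α → α) (r : Nat → α) (init : List α),
      init.length = m → (∀ i, ∀ a ∈ init, h i a = r i) →
      (List.range m).foldl (fun acc i => acc.modify (m - 1 - i) (h i)) init
        = ((List.range m).map r).reverse := by
  intro m
  induction m with
  | zero => intro h r init hlen _; simp [List.length_eq_zero_iff.mp hlen]
  | succ m ih =>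
    intro h r init hlen hh
    obtain ⟨l', x, rfl⟩ : ∃ l' x, init = l' ++ [x] := by
      rcases List.eq_nil_or_concat init with h0 | ⟨l', x, hx⟩
      · simp [h0] at hlen
      · exact ⟨l', x, by simp [hx]⟩
    have hl' : l'.length = m := by simpa using hlen
    rw [List.range_succ_eq_map]
    simp only [List.foldl_cons, List.foldl_map]
    have hstep0 : (l' ++ [x]).modify (m + 1 - 1 - 0) (h 0) = l' ++ [r 0] := by
      have e : m + 1 - 1 - 0 = l'.length := by omega
      rw [e, pv_modify_append_self]
      rw [hh 0 x (by simp)]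
    rw [hstep0]
    have hmain :
        (List.range m).foldl
            (fun acc i => acc.modify (m + 1 - 1 - Nat.succ i) (h (Nat.succ i))) (l' ++ [r 0])
          = (List.range m).foldl (fun acc i => acc.modify (m - 1 - i) (h (i + 1))) l' ++ [r 0] := by
      apply pv_foldl_last_fixed _ _ _ (fun a => a.length = m)
      · exact hl'
      · intro a i hi hPa
        have him : i < m := List.mem_range.mp hi
        have e : m + 1 - 1 - Nat.succ i = m - 1 - i := by omega
        rw [e, pv_modify_append_left _ _ _ _ (by omega)]
      · intro a i hi hPa
        simpa using hPa
    rw [hmain,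
        ih (fun i => h (i + 1)) (fun i => r (i + 1)) l' hl'
          (fun i a ha => hh (i + 1) a (by simp [ha]))]
    simp [List.map_map, Function.comp_def, Nat.succ_eq_add_one]

-- take n ∘ drop (r·n) of a flattening of uniform-length-n rows is row r
theorem pv_chunk {α : Type} :
    ∀ (L : List (List α)) (n : Nat), (∀ row ∈ L, row.length = n) →
      ∀ r, r < L.length → (L.flatten.drop (r * n)).take n = L.getD r [] := by
  intro L
  induction L with
  | nil => intro n _ r hr; simp at hr
  | cons row L ih =>
    intro n hrows r hr
    have hrow : row.length = n := hrows row (by simp)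
    cases r with
    | zero =>
      simp only [Nat.zero_mul, List.drop_zero, List.flatten_cons, List.getD]
      rw [List.take_append_of_le_length (by omega)]
      simp [← hrow]
    | succ r =>
      simp only [List.flatten_cons, List.getD_cons_succ]
      rw [List.drop_append]
      have e1 : row.drop ((r + 1) * n) = [] := by
        apply List.drop_eq_nil_of_le; nlinarith [hrow]
      have e2 : (r + 1) * n - row.length = r * n := by rw [hrow]; ring_nf; omega
      rw [e1, e2, List.nil_append]
      exact ih n (fun rw hrw => hrows rw (by simp [hrw])) r (by simpa using hr)

-- reading back every index of a list of length k reproduces the list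
theorem pv_map_getD {α : Type} :
    ∀ (L : List α) (d : α), (List.range L.length).map (fun r => L.getD r d) = L := by
  intro L
  induction L with
  | nil => intro d; simp
  | cons x L ih =>
    intro d
    rw [List.length_cons, List.range_succ_eq_map]
    simp only [List.map_cons, List.map_map]
    simpa using ih d

-- A's fold of in-place assignments equals the reversed list of reversed rows
theorem pv_Aside (n : Nat) (f : Nat → Nat → Int) :
    (List.range n).foldl (fun nm i =>
      (List.range n).foldl (fun nm j =>
        nm.modify (n - 1 - i) (fun row => row.set (n - 1 - j) (f i j))) nm)
      ((List.range n).map (fun _ => (List.range n).map (fun _ => (0 : Int))))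
    = ((List.range n).map (fun i => ((List.range n).map (f i)).reverse)).reverse := by
  have hcond : ∀ i, ∀ a ∈ (List.range n).map (fun _ => (List.range n).map (fun _ => (0 : Int))),
      (List.range n).foldl (fun row j => row.set (n - 1 - j) (f i j)) a
        = ((List.range n).map (f i)).reverse := by
    intro i a ha
    simp only [List.mem_map, List.mem_range] at ha
    obtain ⟨_, _, rfl⟩ := ha
    simp only [List.set_eq_modify]
    exact pv_fill_modify n (fun j _ => f i j) (f i) _ (by simp) (fun _ _ _ => rfl)
  have hfuse : (fun (nm : List (List Int)) (i : Nat) =>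
      (List.range n).foldl (fun nm j =>
        nm.modify (n - 1 - i) (fun row => row.set (n - 1 - j) (f i j))) nm)
    = (fun nm i => nm.modify (n - 1 - i)
        (fun row => (List.range n).foldl (fun row j => row.set (n - 1 - j) (f i j)) row)) := by
    funext nm i
    exact pv_foldl_modify_fuse (n - 1 - i) (fun j row => row.set (n - 1 - j) (f i j)) _ nm
  rw [hfuse]
  exact pv_fill_modify n
    (fun i row => (List.range n).foldl (fun row j => row.set (n - 1 - j) (f i j)) row)
    (fun i => ((List.range n).map (f i)).reverse) _ (by simp) hcond

-- B's slices of the reversed flattening are exactly the rows of that same matrix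
theorem pv_Bside (n : Nat) (f : Nat → Nat → Int) :
    (List.range n).map (fun (r : Nat) =>
      PySem.List.slice
        ((List.range n).flatMap (fun i => (List.range n).map (fun j => f i j))).reverse
        (some ((r : Int) * (n : Int))) (some (((r : Int) + 1) * (n : Int))))
    = ((List.range n).map (fun i => ((List.range n).map (f i)).reverse)).reverse := by
  set M : List (List Int) :=
    ((List.range n).map (fun i => ((List.range n).map (f i)).reverse)).reverse with hM
  have hMlen : M.length = n := by simp [hM]
  have hMrows : ∀ row ∈ M, row.length = n := by
    intro row hrow
    rw [hM] at hrow
    simp only [List.mem_reverse, List.mem_map, List.mem_range] at hrow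
    obtain ⟨i, _, rfl⟩ := hrow
    simp
  have hflat :
      ((List.range n).flatMap (fun i => (List.range n).map (fun j => f i j))).reverse
        = M.flatten := by
    rw [List.flatMap_def, List.reverse_flatten, hM]
    simp [List.map_map, Function.comp_def]
  rw [hflat]
  have hslice : ∀ r, r < n →
      PySem.List.slice M.flatten
        (some ((r : Int) * (n : Int))) (some (((r : Int) + 1) * (n : Int)))
        = M.getD r [] := by
    intro r hr
    have e1 : ((r : Int) * (n : Int)) = ((r * n : Nat) : Int) := by push_cast; ring
    have e2 : (((r : Int) + 1) * (n : Int)) = ((r * n : Nat) : Int) + ((n : Nat) : Int) := by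
      push_cast; ring
    rw [e1, e2, PySem.List.slice_natCast_add]
    exact pv_chunk M n hMrows r (by omega)
  have hmc : (List.range n).map (fun (r : Nat) =>
      PySem.List.slice M.flatten
        (some ((r : Int) * (n : Int))) (some (((r : Int) + 1) * (n : Int))))
      = (List.range n).map (fun r => M.getD r []) :=
    List.map_congr_left (fun r hr => hslice r (List.mem_range.mp hr))
  rw [hmc, ← hMlen]
  exact pv_map_getD M []

-- the two ports are equal: both compute the reversed list of reversed rows
theorem pv_ports_eq (matrix : List (List Int)) :
    rotate_matrix_180 matrix = rotate_matrix_180_alt matrix := by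
  unfold rotate_matrix_180 rotate_matrix_180_alt
  exact (pv_Aside (matrix.headD []).length (fun i j => (matrix.getD i []).getD j 0)).trans
    (pv_Bside (matrix.headD []).length (fun i j => (matrix.getD i []).getD j 0)).symm

-- ===== VERDICT (by name: the statement is the Claim_ definition above) =====
theorem rotate_matrix_180_spec : Claim_equal_rotate_matrix_180 := by
  intro matrix _ _
  unfold Spec_rotate_matrix_180
  exact pv_ports_eq matrix
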